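-- pv_equiv track=rewrite | github.com/SovesT1337/ASVT_DZ_1 | main.py | make_set
-- ===== SOURCE A (Python) =====
-- def make_set(temp_):
--     new_temp_ = [set(), set(), set(), set(), set(), set(), set()]
--     final_ = [set(), set(), set(), set(), set(), set(), set()]
--     for i_ in range(6):
--         for j_, c in temp_[i_]:
--             new_temp_[i_].add((j_, c))
--     for i_ in range(6):
--         for j_, c in temp_[i_]:
--             if c:
--                 final_[i_].add((j_, c))
--     return new_temp_, final_
-- ===== SOURCE B (Python) =====
-- def make_set(temp_):
--     # recursive single pass: each of the first six rows is scanned ONCE,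
--     # building its full set and its truthy set together; the seventh empty
--     # slot is the recursion's base case.
--     def go(rows, k):
--         if k == 0:
--             return [set()], [set()]
--         s, f = set(), set()
--         for t in rows[0]:
--             s.add(t)
--             if t[1]:
--                 f.add(t)
--         ns, nf = go(rows[1:], k - 1)
--         return [s] + ns, [f] + nf
--     return go(temp_, 6)
-- ===== Notes on version B (the rewrite author's own statement) =====
-- stated objective: alternative
-- what changed: B replaces A's two staged indexed rescans of the input by one recursion over the rows that scans each row once, building that row's full set and its truthy-filtered set simultaneously and consing both result lists; the trailing seventh empty set is the recursion's base case.
import Mathlib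
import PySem

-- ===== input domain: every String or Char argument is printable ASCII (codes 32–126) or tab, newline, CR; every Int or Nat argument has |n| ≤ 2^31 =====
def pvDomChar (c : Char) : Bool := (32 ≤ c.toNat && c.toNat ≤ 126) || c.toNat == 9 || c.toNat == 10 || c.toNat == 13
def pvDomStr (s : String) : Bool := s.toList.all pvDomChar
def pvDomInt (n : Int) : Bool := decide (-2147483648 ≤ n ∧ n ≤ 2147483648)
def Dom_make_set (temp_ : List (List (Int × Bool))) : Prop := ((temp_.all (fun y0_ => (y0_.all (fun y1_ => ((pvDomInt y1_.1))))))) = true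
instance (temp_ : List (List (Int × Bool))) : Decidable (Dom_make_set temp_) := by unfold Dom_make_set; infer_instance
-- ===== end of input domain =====

-- B replaces A's two staged indexed rescans by one recursion over the rows that scans each
-- row once, building its full set and its truthy set together (alternative decomposition).

-- ===== PORT A =====
-- Literal port of A: two passes over range(6), each mutating the i_-th set in place.
-- temp_[i_] raises IndexError when len(temp_) < 6: Pre_make_set excludes that, so the
-- pyGetD default [] is never reached on admitted inputs.
def make_set (temp_ : List (List (Int × Bool))) : (List (List (Int × Bool))) × (List (List (Int × Bool))) :=
  let new_temp_ : List (PySem.Set (Int × Bool)) :=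
    (PySem.List.pyRange 0 6 1).foldl
      (fun nt i_ =>
        (PySem.List.pyGetD temp_ i_ []).foldl
          (fun nt jc =>
            PySem.List.pySetD nt i_ (PySem.Set.add (PySem.List.pyGetD nt i_ []) jc)) nt)
      [PySem.Set.empty, PySem.Set.empty, PySem.Set.empty, PySem.Set.empty, PySem.Set.empty, PySem.Set.empty, PySem.Set.empty]
  let final_ : List (PySem.Set (Int × Bool)) :=
    (PySem.List.pyRange 0 6 1).foldl
      (fun f i_ =>
        (PySem.List.pyGetD temp_ i_ []).foldl
          (fun f jc =>
            if jc.2 then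
              PySem.List.pySetD f i_ (PySem.Set.add (PySem.List.pyGetD f i_ []) jc)
            else f) f)
      [PySem.Set.empty, PySem.Set.empty, PySem.Set.empty, PySem.Set.empty, PySem.Set.empty, PySem.Set.empty, PySem.Set.empty]
  (new_temp_, final_)

-- ===== PORT B =====
-- Literal port of B's helper go(rows, k): base case the seventh empty slot; otherwise one
-- fold over rows[0] building (s, f) jointly, then recurse on rows[1:] and cons both results.
def make_set_go (rows : List (List (Int × Bool))) (k : Nat) :
    (List (List (Int × Bool))) × (List (List (Int × Bool))) :=
  match k with
  | 0 => ([PySem.Set.empty], [PySem.Set.empty])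
  | Nat.succ k =>
    let sf :=
      (PySem.List.pyGetD rows 0 []).foldl
        (fun sf t => (PySem.Set.add sf.1 t, if t.2 then PySem.Set.add sf.2 t else sf.2))
        (PySem.Set.empty, PySem.Set.empty)
    let rest := make_set_go (PySem.List.slice rows (some 1) none) k
    (sf.1 :: rest.1, sf.2 :: rest.2)

def make_set_alt (temp_ : List (List (Int × Bool))) : (List (List (Int × Bool))) × (List (List (Int × Bool))) :=
  make_set_go temp_ 6

-- ===== PRECONDITION & SPEC =====
-- A subscripts temp_[0]..temp_[5]; Python raises IndexError when len(temp_) < 6.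
def Pre_make_set (temp_ : List (List (Int × Bool))) : Prop := 6 ≤ temp_.length
instance (temp_ : List (List (Int × Bool))) : Decidable (Pre_make_set temp_) := by unfold Pre_make_set; infer_instance
def pvWitness_make_set : (List (List (Int × Bool))) := [[(1, true)], [(2, false), (2, false)], [], [], [], []]

def Spec_make_set (temp_ : List (List (Int × Bool))) (out : (List (List (Int × Bool))) × (List (List (Int × Bool)))) : Prop := out = make_set_alt temp_
instance (temp_ : List (List (Int × Bool))) (out : (List (List (Int × Bool))) × (List (List (Int × Bool)))) : Decidable (Spec_make_set temp_ out) := by unfold Spec_make_set; infer_instance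

-- ===== CLAIM (what is proved, stated in full; the proofs are below) =====
def Claim_equal_make_set : Prop := ∀ (temp_ : List (List (Int × Bool))), Dom_make_set temp_ → Pre_make_set temp_ → Spec_make_set temp_ (make_set temp_)

-- ===== LEMMAS AND PROOFS =====

-- A's inner loop at a fixed nonneg in-range index i updates only slot i, folding Set.add over the row.
lemma innerA (i : Int) (hi : 0 ≤ i) (row : List (Int × Bool)) :
    ∀ (nt : List (List (Int × Bool))), i.toNat < nt.length →
    row.foldl (fun s jc => PySem.List.pySetD s i (PySem.Set.add (PySem.List.pyGetD s i []) jc)) nt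
      = nt.set i.toNat (row.foldl (fun s jc => PySem.Set.add s jc) (nt.getD i.toNat [])) := by
  induction row with
  | nil =>
    intro nt h
    simp [List.getElem?_eq_getElem h, List.getD]
  | cons jc row ih =>
    intro nt h
    simp only [List.foldl_cons]
    rw [PySem.List.pySetD_of_nonneg _ _ hi, PySem.List.pyGetD_of_nonneg _ _ hi]
    rw [ih (nt.set i.toNat (PySem.Set.add (nt.getD i.toNat []) jc)) (by simpa using h)]
    rw [List.set_set]
    congr 2
    simp [List.getD, List.getElem?_set_self', List.getElem?_eq_getElem h]

-- B's joint fold splits into the plain dedup fold and the dedup fold over the truthy filter.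
lemma pair_fold (row : List (Int × Bool)) :
    ∀ (a b : List (Int × Bool)),
    row.foldl (fun sf t => (PySem.Set.add sf.1 t, if t.2 then PySem.Set.add sf.2 t else sf.2)) (a, b)
      = (row.foldl (fun s t => PySem.Set.add s t) a,
         (row.filter (fun t => t.2)).foldl (fun s t => PySem.Set.add s t) b) := by
  induction row with
  | nil => intro a b; simp
  | cons t row ih =>
    intro a b
    by_cases h : t.2 = true
    · simp [h, ih]
    · simp [h, ih]

-- every slot ends as an ofList
lemma slotA_new (t : List (Int × Bool)) :
    t.foldl (fun s jc => PySem.Set.add s jc) [] = PySem.Set.ofList t :=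
  (PySem.Set.ofList_eq_foldl t).symm

lemma slice_one (x : List (Int × Bool)) (xs : List (List (Int × Bool))) :
    PySem.List.slice (x :: xs) (some 1) none = xs := by
  simpa using PySem.List.slice_from_natCast (x :: xs) 1

-- ===== VERDICT (by name: the statement is the Claim_ definition above) =====
theorem make_set_spec : Claim_equal_make_set := by
  intro temp_ _ hpre
  unfold Spec_make_set
  match temp_, hpre with
  | t0 :: t1 :: t2 :: t3 :: t4 :: t5 :: rest, _ =>
    show make_set (t0 :: t1 :: t2 :: t3 :: t4 :: t5 :: rest)
        = make_set_alt (t0 :: t1 :: t2 :: t3 :: t4 :: t5 :: rest)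
    unfold make_set make_set_alt
    -- unfold B's recursion six levels, peeling one row each time
    rw [show (6 : Nat) = Nat.succ 5 from rfl]
    simp only [make_set_go, slice_one]
    -- B's pyGetD _ 0 on each peeled tail
    simp only [show ∀ (x : List (Int × Bool)) (xs : List (List (Int × Bool))),
        PySem.List.pyGetD (x :: xs) (0:Int) [] = x from fun x xs => by
          rw [PySem.List.pyGetD_of_nonneg _ _ (by norm_num)]; rfl]
    simp only [pair_fold, PySem.Set.empty]
    -- A side
    have hr : PySem.List.pyRange 0 6 1 = [0, 1, 2, 3, 4, 5] := by decide
    rw [hr]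
    simp only [List.foldl_cons, List.foldl_nil]
    have g0 : PySem.List.pyGetD (t0 :: t1 :: t2 :: t3 :: t4 :: t5 :: rest) 0 [] = t0 := by
      rw [PySem.List.pyGetD_of_nonneg _ _ (by norm_num)]; rfl
    have g1 : PySem.List.pyGetD (t0 :: t1 :: t2 :: t3 :: t4 :: t5 :: rest) 1 [] = t1 := by
      rw [PySem.List.pyGetD_of_nonneg _ _ (by norm_num)]; rfl
    have g2 : PySem.List.pyGetD (t0 :: t1 :: t2 :: t3 :: t4 :: t5 :: rest) 2 [] = t2 := by
      rw [PySem.List.pyGetD_of_nonneg _ _ (by norm_num)]; rfl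
    have g3 : PySem.List.pyGetD (t0 :: t1 :: t2 :: t3 :: t4 :: t5 :: rest) 3 [] = t3 := by
      rw [PySem.List.pyGetD_of_nonneg _ _ (by norm_num)]; rfl
    have g4 : PySem.List.pyGetD (t0 :: t1 :: t2 :: t3 :: t4 :: t5 :: rest) 4 [] = t4 := by
      rw [PySem.List.pyGetD_of_nonneg _ _ (by norm_num)]; rfl
    have g5 : PySem.List.pyGetD (t0 :: t1 :: t2 :: t3 :: t4 :: t5 :: rest) 5 [] = t5 := by
      rw [PySem.List.pyGetD_of_nonneg _ _ (by norm_num)]; rfl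
    rw [g0, g1, g2, g3, g4, g5]
    -- A's final_ loops skip falsy pairs: that is the plain fold over the truthy-filtered row
    simp only [← List.foldl_filter]
    rw [innerA 0 (by norm_num) t0 _ (by simp),
        innerA 1 (by norm_num) t1 _ (by simp),
        innerA 2 (by norm_num) t2 _ (by simp),
        innerA 3 (by norm_num) t3 _ (by simp),
        innerA 4 (by norm_num) t4 _ (by simp),
        innerA 5 (by norm_num) t5 _ (by simp)]
    rw [innerA 0 (by norm_num) (t0.filter (fun jc => jc.2)) _ (by simp),
        innerA 1 (by norm_num) (t1.filter (fun jc => jc.2)) _ (by simp),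
        innerA 2 (by norm_num) (t2.filter (fun jc => jc.2)) _ (by simp),
        innerA 3 (by norm_num) (t3.filter (fun jc => jc.2)) _ (by simp),
        innerA 4 (by norm_num) (t4.filter (fun jc => jc.2)) _ (by simp),
        innerA 5 (by norm_num) (t5.filter (fun jc => jc.2)) _ (by simp)]
    simp [List.getD, slotA_new]
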